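-- pv_equiv track=rewrite | github.com/Hinneman/blender-model-optimizer | build.py | strip_leading_docstring
-- ===== SOURCE A (Python) =====
-- def strip_leading_docstring(source):
--     """Remove a leading triple-quoted docstring and return the rest."""
--     stripped = source.lstrip()
--     for quote in ('"""', "'''"):
--         if stripped.startswith(quote):
--             end = stripped.find(quote, 3)
--             if end != -1:
--                 return stripped[end + 3 :].lstrip("\n")
--     return source
-- ===== SOURCE B (Python) =====
-- def strip_leading_docstring(source):
--     """Remove a leading triple-quoted docstring and return the rest."""
--     stripped = source.lstrip()
--     quote = stripped[:3]
--     if quote in ('"""', "'''"):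
--         parts = stripped.split(quote)
--         # parts[0] == '' (the opener), parts[1] == the docstring body up to the
--         # first closer; everything after that closer is the split parts from
--         # index 2 on, re-joined with the delimiter itself.
--         if len(parts) >= 3:
--             return quote.join(parts[2:]).lstrip("\n")
--     return source
-- ===== Notes on version B (the rewrite author's own statement) =====
-- stated objective: alternative
-- what changed: B replaces A's quote loop with startswith and an index-returning str.find plus slicing by a splitting decomposition: it splits the stripped source into the list of delimiter-separated parts and rejoins every part after the second with the delimiter, so no index arithmetic or find/slice appears.
import Mathlib
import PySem

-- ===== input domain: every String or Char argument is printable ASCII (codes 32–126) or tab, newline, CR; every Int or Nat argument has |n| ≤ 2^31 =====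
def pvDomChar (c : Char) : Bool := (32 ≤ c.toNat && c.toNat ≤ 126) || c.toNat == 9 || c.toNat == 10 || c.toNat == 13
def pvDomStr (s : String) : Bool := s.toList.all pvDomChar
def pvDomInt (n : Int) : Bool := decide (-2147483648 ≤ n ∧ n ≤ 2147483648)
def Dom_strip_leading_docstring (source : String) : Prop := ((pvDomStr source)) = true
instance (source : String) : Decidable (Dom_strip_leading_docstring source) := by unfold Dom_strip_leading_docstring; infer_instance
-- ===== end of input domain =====

-- B replaces A's startswith/find/slice index arithmetic by split-on-the-delimiter and rejoin (objective: alternative; return value identical).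
-- Python's `.lstrip("\n")` has no PySem primitive; both ports transcribe it exactly as dropWhile (· == '\n') on the char list.

-- ===== PORT A =====
-- the loop `for quote in (three-dquotes, three-squotes)`: recursion over the remaining quote tuple
def pvALoop (stripped source : String) : List String → String
  | [] => source
  | q :: qs =>
    if PySem.Str.startswith stripped q then
      let e := PySem.Str.findFrom stripped q 3
      if e ≠ -1 then
        -- stripped[end + 3 :].lstrip("\n")
        String.ofList (((PySem.Str.slice stripped (some (e + 3)) none).toList).dropWhile (· == '\n'))
      else pvALoop stripped source qs
    else pvALoop stripped source qs

def strip_leading_docstring (source : String) : String :=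
  pvALoop (PySem.Str.lstrip source) source ["\"\"\"", "'''"]

-- ===== PORT B =====
def strip_leading_docstring_alt (source : String) : String :=
  let stripped := PySem.Str.lstrip source
  let quote := PySem.Str.slice stripped none (some 3)            -- stripped[:3]
  if quote = "\"\"\"" ∨ quote = "'''" then                       -- quote in ('"""', "'''")
    let parts := PySem.Chars.splitOn stripped.toList quote.toList  -- stripped.split(quote)
    if 3 ≤ parts.length then
      -- quote.join(parts[2:]).lstrip("\n")
      String.ofList ((PySem.Chars.join quote.toList (PySem.List.slice parts (some 2) none)).dropWhile (· == '\n'))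
    else source
  else source

-- ===== PRECONDITION & SPEC =====
def Spec_strip_leading_docstring (source : String) (out : String) : Prop := out = strip_leading_docstring_alt source
instance (source : String) (out : String) : Decidable (Spec_strip_leading_docstring source out) := by unfold Spec_strip_leading_docstring; infer_instance

-- ===== CLAIM (what is proved, stated in full; the proofs are below) =====
def Claim_equal_strip_leading_docstring : Prop := ∀ (source : String), Dom_strip_leading_docstring source → Spec_strip_leading_docstring source (strip_leading_docstring source)

-- ===== LEMMAS AND PROOFS =====

-- find points at the FIRST occurrence; conversely the first occurrence determines find
lemma pvFind_eq (l sub : List Char) (k : Nat)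
    (hk : sub <+: l.drop k) (hmin : ∀ i < k, ¬ sub <+: l.drop i) :
    PySem.Chars.find l sub = (k : Int) := by
  have hinf : sub <:+: l := hk.isInfix.trans (List.drop_suffix k l).isInfix
  have hpos : 0 ≤ PySem.Chars.find l sub := (PySem.Chars.find_nonneg_iff l sub).mpr hinf
  obtain ⟨hp, hm⟩ := PySem.Chars.find_spec hpos
  have hK : (PySem.Chars.find l sub).toNat = k := by
    rcases Nat.lt_trichotomy (PySem.Chars.find l sub).toNat k with h | h | h
    · exact absurd hp (hmin _ h)
    · exact h
    · exact absurd hk (hm _ h)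
  omega

-- the fuelled scanner splitOn.go, characterised by the first occurrence of sep
lemma pvGo_spec (sep : List Char) (hs : sep ≠ []) :
    ∀ (n : Nat) (l : List Char), l.length = n → ∀ (fuel : Nat) (cur : List Char)
      (acc : List (List Char)), l.length < fuel →
    PySem.Chars.splitOn.go sep fuel l cur acc =
      acc.reverse ++ (if sep <:+: l
        then (cur.reverse ++ l.take (PySem.Chars.find l sep).toNat) ::
             PySem.Chars.splitOn (l.drop ((PySem.Chars.find l sep).toNat + sep.length)) sep
        else [cur.reverse ++ l]) := by
  intro n
  induction n using Nat.strong_induction_on with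
  | _ n ih =>
    intro l hln fuel cur acc hfuel
    match fuel, hfuel with
    | fuel + 1, hf =>
      match l, hln with
      | [], hln =>
        rw [PySem.Chars.splitOn.go.eq_def]
        have : ¬ sep <:+: ([] : List Char) := fun h => hs (List.infix_nil.mp h)
        simp [this]
      | c :: rest, hln =>
        have hcr : (c :: rest).length = rest.length + 1 := by simp
        have hsl : 1 ≤ sep.length := by
          cases sep with
          | nil => exact absurd rfl hs
          | cons a t => simp
        rw [PySem.Chars.splitOn.go.eq_def]
        simp only []
        by_cases hp : sep.isPrefixOf (c :: rest) = true
        · rw [if_pos hp]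
          have hpre : sep <+: c :: rest := List.isPrefixOf_iff_prefix.mp hp
          have hinf : sep <:+: c :: rest := hpre.isInfix
          have hfind : PySem.Chars.find (c :: rest) sep = ((0 : Nat) : Int) :=
            pvFind_eq _ _ 0 (by simpa using hpre) (fun i hi => absurd hi (Nat.not_lt_zero i))
          have hlen' : (List.drop sep.length (c :: rest)).length = (c :: rest).length - sep.length := by
            simp
          have hlt : (List.drop sep.length (c :: rest)).length < n := by omega
          have hf2 : (List.drop sep.length (c :: rest)).length < fuel := by omega
          have hstep := ih _ hlt _ rfl fuel [] (cur.reverse :: acc) hf2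
          simp only [List.reverse_nil, List.nil_append] at hstep
          have hsplit : PySem.Chars.splitOn (List.drop sep.length (c :: rest)) sep =
              (if sep <:+: List.drop sep.length (c :: rest)
                then (List.drop sep.length (c :: rest)).take
                       (PySem.Chars.find (List.drop sep.length (c :: rest)) sep).toNat ::
                     PySem.Chars.splitOn ((List.drop sep.length (c :: rest)).drop
                       ((PySem.Chars.find (List.drop sep.length (c :: rest)) sep).toNat + sep.length)) sep
                else [List.drop sep.length (c :: rest)]) := by
            have := ih _ hlt _ rfl ((List.drop sep.length (c :: rest)).length + 1) [] [] (by omega)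
            rw [PySem.Chars.splitOn]
            simpa using this
          rw [hstep, ← hsplit, if_pos hinf, hfind]
          simp
        · rw [if_neg hp]
          have hnpre : ¬ sep <+: c :: rest := fun h => hp (List.isPrefixOf_iff_prefix.mpr h)
          have hlt : rest.length < n := by omega
          have hf2 : rest.length < fuel := by omega
          have hstep := ih _ hlt rest rfl fuel (c :: cur) acc hf2
          rw [hstep]
          by_cases hi : sep <:+: rest
          · have hiL : sep <:+: c :: rest := hi.trans (List.suffix_cons c rest).isInfix
            have hposr : 0 ≤ PySem.Chars.find rest sep := (PySem.Chars.find_nonneg_iff _ _).mpr hi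
            obtain ⟨hpr, hmr⟩ := PySem.Chars.find_spec hposr
            set k := (PySem.Chars.find rest sep).toNat with hkdef
            have hfind : PySem.Chars.find (c :: rest) sep = ((k + 1 : Nat) : Int) := by
              apply pvFind_eq
              · simpa using hpr
              · intro i hi'
                match i with
                | 0 => simpa using hnpre
                | i + 1 => simpa using hmr i (by omega)
            rw [if_pos hi, if_pos hiL, hfind]
            have hdr : k + 1 + sep.length = (k + sep.length) + 1 := by omega
            simp [List.take_succ_cons, hdr, List.drop_succ_cons]
          · have hniL : ¬ sep <:+: c :: rest := by
              rw [List.infix_cons_iff]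
              rintro (h | h)
              · exact hnpre h
              · exact hi h
            rw [if_neg hi, if_neg hniL]
            simp

-- str.split, characterised by the first occurrence of the separator
lemma pvSplitOn_char (sep l : List Char) (hs : sep ≠ []) :
    PySem.Chars.splitOn l sep =
      (if sep <:+: l
        then l.take (PySem.Chars.find l sep).toNat ::
             PySem.Chars.splitOn (l.drop ((PySem.Chars.find l sep).toNat + sep.length)) sep
        else [l]) := by
  have := pvGo_spec sep hs l.length l rfl (l.length + 1) [] [] (by omega)
  rw [PySem.Chars.splitOn]
  simpa using this

lemma pvSplitOn_ne_nil (sep l : List Char) (hs : sep ≠ []) :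
    PySem.Chars.splitOn l sep ≠ [] := by
  rw [pvSplitOn_char sep l hs]
  split_ifs <;> simp

-- sep.join(s.split(sep)) == s
lemma pvJoin_splitOn (sep : List Char) (hs : sep ≠ []) :
    ∀ (n : Nat) (l : List Char), l.length = n →
      PySem.Chars.join sep (PySem.Chars.splitOn l sep) = l := by
  intro n
  induction n using Nat.strong_induction_on with
  | _ n ih =>
    intro l hln
    rw [pvSplitOn_char sep l hs]
    by_cases hi : sep <:+: l
    · rw [if_pos hi]
      have hpos : 0 ≤ PySem.Chars.find l sep := (PySem.Chars.find_nonneg_iff _ _).mpr hi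
      obtain ⟨hp, _⟩ := PySem.Chars.find_spec hpos
      set k := (PySem.Chars.find l sep).toNat with hk
      obtain ⟨r, hr⟩ := hp
      have hsl : 1 ≤ sep.length := by
        cases sep with
        | nil => exact absurd rfl hs
        | cons a t => simp
      have hkl : k < l.length := by
        have h1 : sep.length + r.length = (l.drop k).length := by rw [← hr]; simp
        simp at h1
        omega
      have hrd : r = l.drop (k + sep.length) := by
        have : (sep ++ r).drop sep.length = (l.drop k).drop sep.length := by rw [hr]
        simpa [List.drop_drop, Nat.add_comm] using this
      set t := l.drop (k + sep.length) with ht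
      have htl : t.length < n := by
        simp [ht]; omega
      have hjoin : PySem.Chars.join sep (PySem.Chars.splitOn t sep) = t :=
        ih t.length htl t rfl
      rcases hsp : PySem.Chars.splitOn t sep with _ | ⟨x, xs⟩
      · exact absurd hsp (pvSplitOn_ne_nil sep t hs)
      · rw [PySem.Chars.join_cons_cons]
        rw [hsp] at hjoin
        rw [List.append_assoc, hjoin, ← hrd, hr]
        exact List.take_append_drop k l
    · rw [if_neg hi]
      exact PySem.Chars.join_singleton sep l

-- A's `startswith quote → find(quote, 3)` branch equals B's split/rejoin branch,
-- for a stripped string starting q q q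
lemma pvBranch_eq (s qs source : String) (q : Char) (rest : List Char)
    (hqs : qs.toList = [q, q, q]) (hl : s.toList = q :: q :: q :: rest) :
    (if PySem.Str.findFrom s qs 3 ≠ -1 then
        String.ofList ((PySem.Str.slice s (some (PySem.Str.findFrom s qs 3 + 3)) none).toList.dropWhile (· == '\n'))
      else source)
    = (if 3 ≤ (PySem.Chars.splitOn s.toList qs.toList).length then
        String.ofList ((PySem.Chars.join qs.toList
          (PySem.List.slice (PySem.Chars.splitOn s.toList qs.toList) (some 2) none)).dropWhile (· == '\n'))
      else source) := by
  have hs : qs.toList ≠ [] := by rw [hqs]; simp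
  have hlen : 3 ≤ s.toList.length := by rw [hl]; simp
  have hFF : PySem.Str.findFrom s qs 3 =
      if PySem.Chars.find rest [q, q, q] = -1 then -1 else 3 + PySem.Chars.find rest [q, q, q] := by
    rw [PySem.Str.findFrom_eq, hqs, show (3:Int) = ((3:Nat):Int) by norm_num,
      PySem.Chars.findFrom_natCast _ _ 3 hlen, hl]
    simp
  have hfind0 : PySem.Chars.find s.toList qs.toList = (0 : Int) := by
    apply pvFind_eq
    · rw [hl, hqs]; exact ⟨rest, by simp⟩
    · exact fun i hi => absurd hi (Nat.not_lt_zero i)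
  have hpre : qs.toList <+: s.toList := by rw [hl, hqs]; exact ⟨rest, rfl⟩
  have hsplit0 : PySem.Chars.splitOn s.toList qs.toList =
      [] :: PySem.Chars.splitOn rest qs.toList := by
    rw [pvSplitOn_char _ _ hs, if_pos hpre.isInfix, hfind0]
    rw [hqs, hl]
    simp
  by_cases hinf : qs.toList <:+: rest
  · -- a closing triple quote exists
    have hpos : 0 ≤ PySem.Chars.find rest qs.toList := (PySem.Chars.find_nonneg_iff _ _).mpr hinf
    obtain ⟨k, hk⟩ : ∃ k : Nat, PySem.Chars.find rest qs.toList = (k : Int) :=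
      ⟨_, (Int.toNat_of_nonneg hpos).symm⟩
    have hsplitr : PySem.Chars.splitOn rest qs.toList =
        rest.take k :: PySem.Chars.splitOn (rest.drop (k + 3)) qs.toList := by
      rw [pvSplitOn_char _ _ hs, if_pos hinf, hk]
      rw [hqs]
      simp
    have hne : PySem.Chars.splitOn (rest.drop (k + 3)) qs.toList ≠ [] :=
      pvSplitOn_ne_nil _ _ hs
    have hnone : ¬ PySem.Chars.find rest [q, q, q] = -1 := by
      rw [← hqs] at *; rw [hk]; omega
    rw [hFF, if_neg hnone, ← hqs, hk] at *
    rw [if_pos (by omega : ¬ (3 + (k:Int)) = -1)]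
    have hlenp : 3 ≤ (PySem.Chars.splitOn s.toList qs.toList).length := by
      rw [hsplit0, hsplitr]
      rcases hsp : PySem.Chars.splitOn (rest.drop (k + 3)) qs.toList with _ | ⟨x, xs⟩
      · exact absurd hsp hne
      · simp
    rw [if_pos hlenp]
    have hdrop2 : PySem.List.slice (PySem.Chars.splitOn s.toList qs.toList) (some 2) none
        = PySem.Chars.splitOn (rest.drop (k + 3)) qs.toList := by
      rw [show (2:Int) = ((2:Nat):Int) by norm_num, PySem.List.slice_from_natCast,
        hsplit0, hsplitr]
      simp
    have hjoin : PySem.Chars.join qs.toList (PySem.Chars.splitOn (rest.drop (k + 3)) qs.toList)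
        = rest.drop (k + 3) := pvJoin_splitOn _ hs _ _ rfl
    have hslice : (PySem.Str.slice s (some (3 + (k:Int) + 3)) none).toList
        = rest.drop (k + 3) := by
      rw [PySem.Str.toList_slice, hl,
        show (3 + (k:Int) + 3) = ((k + 6 : Nat) : Int) by omega]
      rw [PySem.Chars.slice_eq_listSlice, PySem.List.slice_from_natCast,
        show k + 6 = ((k + 3) + 1 + 1 + 1) from by omega]
      simp [List.drop_succ_cons]
    rw [hslice, hdrop2, hjoin]
  · -- no closing triple quote: both sides fall back to source
    have hnone : PySem.Chars.find rest [q, q, q] = -1 := by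
      rw [← hqs]; exact (PySem.Chars.find_eq_neg_one_iff _ _).mpr hinf
    rw [hFF, if_pos hnone]
    simp only [ne_eq, not_true_eq_false, if_false]
    have hsplitr : PySem.Chars.splitOn rest qs.toList = [rest] := by
      rw [pvSplitOn_char _ _ hs, if_neg hinf]
    have hlen2 : ¬ 3 ≤ (PySem.Chars.splitOn s.toList qs.toList).length := by
      rw [hsplit0, hsplitr]; simp
    rw [if_neg hlen2]

-- the whole quote loop of A equals B's split/rejoin on the stripped string
lemma pvMain_aux (source s : String) :
    pvALoop s source ["\"\"\"", "'''"] =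
    (if PySem.Str.slice s none (some 3) = "\"\"\"" ∨ PySem.Str.slice s none (some 3) = "'''" then
      if 3 ≤ (PySem.Chars.splitOn s.toList (PySem.Str.slice s none (some 3)).toList).length then
        String.ofList ((PySem.Chars.join (PySem.Str.slice s none (some 3)).toList
          (PySem.List.slice (PySem.Chars.splitOn s.toList (PySem.Str.slice s none (some 3)).toList)
            (some 2) none)).dropWhile (· == '\n'))
      else source
     else source) := by
  have hdq : ("\"\"\"" : String).toList = ['"', '"', '"'] := by decide
  have hsq : ("'''" : String).toList = ['\'', '\'', '\''] := by decide
  have hqlist : (PySem.Str.slice s none (some 3)).toList = s.toList.take 3 := by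
    rw [PySem.Str.toList_slice, PySem.Chars.slice_eq_listSlice,
      PySem.List.slice_to _ (by norm_num : (0:Int) ≤ 3)]
    rfl
  rcases hl : s.toList with _ | ⟨a, _ | ⟨b, _ | ⟨c, rest⟩⟩⟩
  all_goals rw [hl] at hqlist
  -- fewer than 3 characters: B's quote is shorter than 3, A's startswith both fail
  · have : ¬ (PySem.Str.slice s none (some 3) = "\"\"\"" ∨ PySem.Str.slice s none (some 3) = "'''") := by
      rintro (h | h) <;> rw [← String.toList_inj, hqlist] at h <;> simp [hdq, hsq] at h
    rw [if_neg this]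
    simp [pvALoop, PySem.Str.startswith_eq, hl, hdq, hsq, PySem.Chars.startswith]
  · have : ¬ (PySem.Str.slice s none (some 3) = "\"\"\"" ∨ PySem.Str.slice s none (some 3) = "'''") := by
      rintro (h | h) <;> rw [← String.toList_inj, hqlist] at h <;> simp [hdq, hsq] at h
    rw [if_neg this]
    simp [pvALoop, PySem.Str.startswith_eq, hl, hdq, hsq, PySem.Chars.startswith]
  · have : ¬ (PySem.Str.slice s none (some 3) = "\"\"\"" ∨ PySem.Str.slice s none (some 3) = "'''") := by
      rintro (h | h) <;> rw [← String.toList_inj, hqlist] at h <;> simp [hdq, hsq] at h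
    rw [if_neg this]
    simp [pvALoop, PySem.Str.startswith_eq, hl, hdq, hsq, PySem.Chars.startswith]
  · simp only [List.take_succ_cons, List.take_zero] at hqlist
    by_cases hq : (a = '"' ∨ a = '\'') ∧ b = a ∧ c = a
    · obtain ⟨hab, hb, hc⟩ := hq
      subst hb; subst hc
      cases hab with
      | inl ha =>
        subst ha
        have hqeq : PySem.Str.slice s none (some 3) = "\"\"\"" := by
          rw [← String.toList_inj, hqlist, hdq]
        rw [if_pos (Or.inl hqeq), hqeq]
        have h1 : PySem.Str.startswith s "\"\"\"" = true := by
          rw [PySem.Str.startswith_eq, hl, hdq]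
          exact (PySem.Chars.startswith_iff _ _).mpr ⟨rest, rfl⟩
        simp only [pvALoop, h1, if_pos]
        have h2 : PySem.Str.startswith s "'''" = false := by
          rw [PySem.Str.startswith_eq, hl, hsq]
          simp [PySem.Chars.startswith, List.isPrefixOf]
        simp only [h2, Bool.false_eq_true, if_false]
        have hbr := pvBranch_eq s "\"\"\"" source '"' rest hdq hl
        rw [hl] at hbr
        exact hbr
      | inr ha =>
        subst ha
        have hqeq : PySem.Str.slice s none (some 3) = "'''" := by
          rw [← String.toList_inj, hqlist, hsq]
        rw [if_pos (Or.inr hqeq), hqeq]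
        have h1 : PySem.Str.startswith s "\"\"\"" = false := by
          rw [PySem.Str.startswith_eq, hl, hdq]
          simp [PySem.Chars.startswith, List.isPrefixOf]
        have h2 : PySem.Str.startswith s "'''" = true := by
          rw [PySem.Str.startswith_eq, hl, hsq]
          exact (PySem.Chars.startswith_iff _ _).mpr ⟨rest, rfl⟩
        simp only [pvALoop, h1, Bool.false_eq_true, if_false, h2, if_pos]
        have hbr := pvBranch_eq s "'''" source '\'' rest hsq hl
        rw [hl] at hbr
        exact hbr
    · have hnq : ¬ (PySem.Str.slice s none (some 3) = "\"\"\"" ∨ PySem.Str.slice s none (some 3) = "'''") := by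
        rintro (h | h) <;> rw [← String.toList_inj, hqlist] at h
        · rw [hdq] at h
          simp only [List.cons.injEq, and_true] at h
          exact hq ⟨Or.inl h.1, h.2.1.trans h.1.symm, h.2.2.trans h.1.symm⟩
        · rw [hsq] at h
          simp only [List.cons.injEq, and_true] at h
          exact hq ⟨Or.inr h.1, h.2.1.trans h.1.symm, h.2.2.trans h.1.symm⟩
      rw [if_neg hnq]
      have hsw : ∀ (q : Char) (qs : String), qs.toList = [q, q, q] →
          (¬ (q = a ∧ q = b ∧ q = c)) → PySem.Str.startswith s qs = false := by
        intro q qs hqs hne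
        rw [PySem.Str.startswith_eq, hqs]
        apply Bool.eq_false_iff.mpr
        intro ht
        obtain ⟨r, hr⟩ := (PySem.Chars.startswith_iff _ _).mp ht
        rw [hl] at hr
        simp only [List.cons_append, List.nil_append, List.cons.injEq] at hr
        exact hne ⟨hr.1, hr.2.1, hr.2.2.1⟩
      have h1 := hsw '"' "\"\"\"" hdq
        (fun h => hq ⟨Or.inl h.1.symm, h.2.1.symm.trans h.1, h.2.2.symm.trans h.1⟩)
      have h2 := hsw '\'' "'''" hsq
        (fun h => hq ⟨Or.inr h.1.symm, h.2.1.symm.trans h.1, h.2.2.symm.trans h.1⟩)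
      simp only [pvALoop, h1, h2, Bool.false_eq_true, if_false]

-- ===== VERDICT (by name: the statement is the Claim_ definition above) =====
theorem strip_leading_docstring_spec : Claim_equal_strip_leading_docstring := by
  intro source _
  unfold Spec_strip_leading_docstring strip_leading_docstring strip_leading_docstring_alt
  exact pvMain_aux source (PySem.Str.lstrip source)
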